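-- pv_equiv track=rewrite | github.com/scman1/validatearticledata | craffiparser.py | str_has_synonym
-- ===== SOURCE A (Python) =====
-- def str_has_synonym(affi_str, synonym_dict):
--     ret_str = ""
--     temp_str = ""
--     for a_key in synonym_dict.keys():
--         if a_key in affi_str:
--             if len(a_key) > len(temp_str):
--                 temp_str = a_key
--     if len(temp_str) > 0:
--         ret_str = synonym_dict[temp_str]
--         affi_str = affi_str.replace(temp_str,'')
--     return ret_str, affi_str
-- ===== SOURCE B (Python) =====
-- def str_has_synonym(affi_str, synonym_dict):
--     # longest key occurring in affi_str wins; ties broken by dict order (stable sort)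
--     for key, value in sorted(synonym_dict.items(), key=lambda kv: len(kv[0]), reverse=True):
--         if key and key in affi_str:
--             return value, affi_str.replace(key, '')
--     return "", affi_str
-- ===== Notes on version B (the rewrite author's own statement) =====
-- stated objective: faster
-- what changed: A's single running-argmax loop (track the longest substring key, then a separate dict lookup) is replaced by a stable sort of the items by key length descending followed by a first-match scan that returns key and value together; the scan stops at the first hit, so substring tests for the remaining keys are skipped entirely.
import Mathlib
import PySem

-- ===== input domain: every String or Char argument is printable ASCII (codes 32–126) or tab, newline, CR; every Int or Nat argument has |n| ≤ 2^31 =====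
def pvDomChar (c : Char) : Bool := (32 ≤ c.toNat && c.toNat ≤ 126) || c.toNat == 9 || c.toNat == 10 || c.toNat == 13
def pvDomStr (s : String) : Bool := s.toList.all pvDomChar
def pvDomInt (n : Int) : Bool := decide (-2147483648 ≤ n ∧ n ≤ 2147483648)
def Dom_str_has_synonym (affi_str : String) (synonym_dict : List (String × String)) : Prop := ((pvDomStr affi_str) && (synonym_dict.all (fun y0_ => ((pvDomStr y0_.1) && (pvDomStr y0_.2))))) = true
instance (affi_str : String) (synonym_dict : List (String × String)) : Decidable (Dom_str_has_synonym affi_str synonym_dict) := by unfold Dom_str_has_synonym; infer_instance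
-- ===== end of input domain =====

-- B replaces A's running longest-substring-key fold by a stable sort of the items by key
-- length (descending) followed by a first-match scan (objective: alternative decomposition).

-- ===== PORT A =====
def str_has_synonym (affi_str : String) (synonym_dict : List (String × String)) : String × String :=
  let d := PySem.Dict.ofList synonym_dict
  let temp_str := d.keys.foldl
    (fun temp_str a_key =>
      if PySem.Str.isIn a_key affi_str then
        (if PySem.Str.len temp_str < PySem.Str.len a_key then a_key else temp_str)
      else temp_str) ""
  if 0 < PySem.Str.len temp_str then
    (d.getD temp_str "", PySem.Str.replace affi_str temp_str "")
  else ("", affi_str)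

-- ===== PORT B =====
def str_has_synonym_alt (affi_str : String) (synonym_dict : List (String × String)) : String × String :=
  let d := PySem.Dict.ofList synonym_dict
  match (PySem.List.sorted d.items (fun kv => PySem.Str.len kv.1) true).find?
      (fun kv => (kv.1 != "") && PySem.Str.isIn kv.1 affi_str) with
  | some kv => (kv.2, PySem.Str.replace affi_str kv.1 "")
  | none => ("", affi_str)

-- ===== PRECONDITION & SPEC =====
def Spec_str_has_synonym (affi_str : String) (synonym_dict : List (String × String)) (out : String × String) : Prop := out = str_has_synonym_alt affi_str synonym_dict
instance (affi_str : String) (synonym_dict : List (String × String)) (out : String × String) : Decidable (Spec_str_has_synonym affi_str synonym_dict out) := by unfold Spec_str_has_synonym; infer_instance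

-- ===== CLAIM (what is proved, stated in full; the proofs are below) =====
def Claim_equal_str_has_synonym : Prop := ∀ (affi_str : String) (synonym_dict : List (String × String)), Dom_str_has_synonym affi_str synonym_dict → Spec_str_has_synonym affi_str synonym_dict (str_has_synonym affi_str synonym_dict)

-- ===== LEMMAS AND PROOFS =====

-- A's loop body (as a named function, for the proofs)
def pvStepA (affi_str temp_str a_key : String) : String :=
  if PySem.Str.isIn a_key affi_str then
    (if PySem.Str.len temp_str < PySem.Str.len a_key then a_key else temp_str)
  else temp_str

-- the "first strict-argmax" fold that B's sort-then-find computes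
def pvStepB (affi_str : String) (acc : Option (String × String)) (kv : String × String) :
    Option (String × String) :=
  match acc with
  | none => if ((kv.1 != "") && PySem.Str.isIn kv.1 affi_str) then some kv else none
  | some b => if ((kv.1 != "") && PySem.Str.isIn kv.1 affi_str)
                  && decide (PySem.Str.len b.1 < PySem.Str.len kv.1) then some kv
              else some b

-- inserting x into a descending-sorted list: effect on the first p-match
theorem find?_insertBy_rev {α : Type} (key : α → Int) (p : α → Bool) (x : α) :
    ∀ (s : List α), s.Pairwise (fun a b => key b ≤ key a) →
    (PySem.List.insertBy (fun a b => decide (key b < key a)) x s).find? p =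
      (match s.find? p with
       | none => if p x then some x else none
       | some b => if p x && decide (key b < key x) then some x else some b) := by
  intro s
  induction s with
  | nil => intro _; simp [PySem.List.insertBy]
  | cons y ys ih =>
    intro hp
    rw [List.pairwise_cons] at hp
    obtain ⟨hy, hys⟩ := hp
    by_cases hlt : key y < key x
    · -- x is inserted in front
      have hins : PySem.List.insertBy (fun a b => decide (key b < key a)) x (y :: ys)
          = x :: y :: ys := by simp [PySem.List.insertBy, hlt]
      rw [hins]
      cases hfind : (y :: ys).find? p with
      | none => cases hpx : p x <;> simp [hpx, hfind]
      | some b =>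
        have hb : b ∈ y :: ys := List.mem_of_find?_eq_some hfind
        have hble : key b ≤ key y := by
          rcases List.mem_cons.mp hb with h | h
          · simp [h]
          · exact hy b h
        have hbx : key b < key x := lt_of_le_of_lt hble hlt
        cases hpx : p x <;> simp [hpx, hfind, hbx]
    · -- x goes past y
      have hins : PySem.List.insertBy (fun a b => decide (key b < key a)) x (y :: ys)
          = y :: PySem.List.insertBy (fun a b => decide (key b < key a)) x ys := by
        simp [PySem.List.insertBy, hlt]
      rw [hins]
      cases hpy : p y with
      | true =>
        simp only [List.find?_cons, hpy]
        have : (p x && decide (key y < key x)) = false := by simp [hlt]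
        simp [this]
      | false =>
        simp only [List.find?_cons, hpy]
        exact ih hys

-- first p-match of the stable length-descending sort = the strict-argmax left fold
theorem find?_sorted_rev_eq_foldl {α : Type} (key : α → Int) (p : α → Bool) :
    ∀ (l : List α),
    (PySem.List.sorted l key true).find? p =
      l.foldl (fun acc x =>
        match acc with
        | none => if p x then some x else none
        | some b => if p x && decide (key b < key x) then some x else some b) none := by
  intro l
  induction l using List.reverseRecOn with
  | nil => simp [PySem.List.sorted]
  | append_singleton l x ih =>
    rw [PySem.List.sorted_rev_eq_foldl_insertBy, List.foldl_append, List.foldl_append]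
    rw [← PySem.List.sorted_rev_eq_foldl_insertBy]
    simp only [List.foldl_cons, List.foldl_nil]
    rw [find?_insertBy_rev key p x _ (PySem.List.sorted_pairwise_rev l key), ih]

-- invariant linking A's best-key accumulator with B's best-item accumulator
def pvRel (t : String) (acc : Option (String × String)) : Prop :=
  match acc with
  | none => t = ""
  | some b => t = b.1 ∧ b.1 ≠ ""

theorem pv_len_pos (s : String) (hs : s ≠ "") : 0 < PySem.Str.len s := by
  rw [PySem.Str.len_eq]
  have hnil : s.toList ≠ [] := by intro hc; apply hs; simp_all
  exact_mod_cast List.length_pos_iff.mpr hnil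

theorem pvRel_step (affi_str t : String) (acc : Option (String × String))
    (kv : String × String) (h : pvRel t acc) :
    pvRel (pvStepA affi_str t kv.1) (pvStepB affi_str acc kv) := by
  have hlen0 : PySem.Str.len "" = (0 : Int) := by rw [PySem.Str.len_eq]; rfl
  cases acc with
  | none =>
    have ht : t = "" := h
    subst ht
    simp only [pvStepA, pvStepB]
    by_cases hin : PySem.Str.isIn kv.1 affi_str = true
    · by_cases hne : kv.1 = ""
      · have hl : ¬ PySem.Str.len "" < PySem.Str.len kv.1 := by
          rw [hne]; exact lt_irrefl _
        rw [if_pos hin, if_neg hl, if_neg (by rw [hne]; simp)]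
        rfl
      · have hl : PySem.Str.len "" < PySem.Str.len kv.1 := by
          have h0 := pv_len_pos kv.1 hne
          omega
        have hb1 : (kv.1 != "") = true := by rwa [bne_iff_ne]
        rw [if_pos hin, if_pos hl, if_pos (by rw [hb1, hin]; rfl)]
        exact ⟨rfl, hne⟩
    · have hinf : PySem.Str.isIn kv.1 affi_str = false := Bool.eq_false_iff.mpr hin
      rw [if_neg hin, if_neg (by rw [hinf]; simp)]
      rfl
  | some b =>
    obtain ⟨ht, hbne⟩ := h
    subst ht
    simp only [pvStepA, pvStepB]
    by_cases hin : PySem.Str.isIn kv.1 affi_str = true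
    · by_cases hl : PySem.Str.len b.1 < PySem.Str.len kv.1
      · have hne : kv.1 ≠ "" := by
          intro hc
          have h0 := pv_len_pos b.1 hbne
          rw [hc] at hl
          omega
        have hb1 : (kv.1 != "") = true := by rwa [bne_iff_ne]
        rw [if_pos hin, if_pos hl, if_pos (by rw [hb1, hin, decide_eq_true hl]; rfl)]
        exact ⟨rfl, hne⟩
      · rw [if_pos hin, if_neg hl, if_neg (by rw [decide_eq_false hl]; simp)]
        exact ⟨rfl, hbne⟩
    · have hinf : PySem.Str.isIn kv.1 affi_str = false := Bool.eq_false_iff.mpr hin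
      rw [if_neg hin, if_neg (by rw [hinf]; simp)]
      exact ⟨rfl, hbne⟩

theorem pvRel_foldl (affi_str : String) (l : List (String × String)) :
    ∀ (t : String) (acc : Option (String × String)), pvRel t acc →
    pvRel (l.foldl (fun t kv => pvStepA affi_str t kv.1) t) (l.foldl (pvStepB affi_str) acc) := by
  induction l with
  | nil => intro t acc h; exact h
  | cons kv l ih =>
    intro t acc h
    simp only [List.foldl_cons]
    exact ih _ _ (pvRel_step affi_str t acc kv h)

-- B's sort-then-find, as the strict-argmax fold over the unsorted items
theorem find?_sorted_pvStepB (affi_str : String) (l : List (String × String)) :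
    (PySem.List.sorted l (fun kv => PySem.Str.len kv.1) true).find?
        (fun kv => (kv.1 != "") && PySem.Str.isIn kv.1 affi_str)
      = l.foldl (pvStepB affi_str) none := by
  rw [find?_sorted_rev_eq_foldl (fun kv => PySem.Str.len kv.1)
        (fun kv => (kv.1 != "") && PySem.Str.isIn kv.1 affi_str) l]
  congr 1
  funext acc x
  cases acc <;> rfl

-- ===== VERDICT (by name: the statement is the Claim_ definition above) =====
theorem str_has_synonym_spec : Claim_equal_str_has_synonym := by
  intro affi_str synonym_dict _
  unfold Spec_str_has_synonym
  show str_has_synonym affi_str synonym_dict = str_has_synonym_alt affi_str synonym_dict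
  unfold str_has_synonym str_has_synonym_alt
  simp only []
  set d := PySem.Dict.ofList synonym_dict with hd
  rw [find?_sorted_pvStepB affi_str d.items]
  have hA : (d.keys.foldl
      (fun temp_str a_key =>
        if PySem.Str.isIn a_key affi_str then
          (if PySem.Str.len temp_str < PySem.Str.len a_key then a_key else temp_str)
        else temp_str) "")
      = d.items.foldl (fun t kv => pvStepA affi_str t kv.1) "" := by
    show ((d.items.map (·.1)).foldl _ "") = _
    rw [List.foldl_map]
    rfl
  rw [hA]
  have hrel := pvRel_foldl affi_str d.items "" none (by simp [pvRel])
  cases hFc : d.items.foldl (pvStepB affi_str) none with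
  | none =>
    rw [hFc] at hrel
    have ht0 : d.items.foldl (fun t kv => pvStepA affi_str t kv.1) "" = "" := hrel
    rw [ht0]
    have he : PySem.Str.len "" = (0 : Int) := by rw [PySem.Str.len_eq]; rfl
    rw [if_neg (by omega)]
  | some b =>
    rw [hFc] at hrel
    obtain ⟨htb, hbne⟩ := hrel
    rw [htb, if_pos (pv_len_pos b.1 hbne)]
    -- value lookup: keys of the dict are nodup, so getD at b.1 returns b.2
    have hmem : b ∈ d.items := by
      have hfind := hFc
      rw [← find?_sorted_pvStepB affi_str d.items] at hfind
      have := List.mem_of_find?_eq_some hfind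
      exact (PySem.List.mem_sorted _ _ _ _).mp this
    have hmem' : (b.1, b.2) ∈ d.items := by rwa [Prod.mk.eta]
    have hget : d.get? b.1 = some b.2 :=
      PySem.Dict.get?_of_mem_items d hmem' (PySem.Dict.nodup_keys_ofList synonym_dict)
    have hgetD : d.getD b.1 "" = b.2 := by
      simp [PySem.Dict.getD, hget]
    rw [hgetD]
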